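-- pv_equiv track=rewrite | github.com/b21627868/drafts | assignment3.py | dict_roll
-- ===== SOURCE A (Python) =====
-- import collections
--
-- n = 0
--
-- def dict_roll(dct):
--     sums = []
--     schucki1 = collections.OrderedDict()
--     shift_values = collections.deque(dct.keys())
--     shift_values.rotate(n)
--     for deger in shift_values:
--         for value in dct.values():
--             if value in sums:
--                 continue
--             schucki1[deger] = value
--             sums.append(value)
--             break
--     return schucki1
-- ===== SOURCE B (Python) =====
-- import collections
--
-- n = 0
--
-- def dict_roll(dct):
--     seen = set()
--     distinct = []
--     for v in dct.values():
--         if v not in seen: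
--             seen.add(v)
--             distinct.append(v)
--     keys = collections.deque(dct.keys())
--     keys.rotate(n)
--     result = collections.OrderedDict()
--     for k, v in zip(keys, distinct):
--         result[k] = v
--     return result
-- ===== Notes on version B (the rewrite author's own statement) =====
-- stated objective: faster
-- what changed: Replace A's per-key rescan of all values with a single first-occurrence dedup pass (set membership) followed by one zip of keys with the distinct values.
import Mathlib
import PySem

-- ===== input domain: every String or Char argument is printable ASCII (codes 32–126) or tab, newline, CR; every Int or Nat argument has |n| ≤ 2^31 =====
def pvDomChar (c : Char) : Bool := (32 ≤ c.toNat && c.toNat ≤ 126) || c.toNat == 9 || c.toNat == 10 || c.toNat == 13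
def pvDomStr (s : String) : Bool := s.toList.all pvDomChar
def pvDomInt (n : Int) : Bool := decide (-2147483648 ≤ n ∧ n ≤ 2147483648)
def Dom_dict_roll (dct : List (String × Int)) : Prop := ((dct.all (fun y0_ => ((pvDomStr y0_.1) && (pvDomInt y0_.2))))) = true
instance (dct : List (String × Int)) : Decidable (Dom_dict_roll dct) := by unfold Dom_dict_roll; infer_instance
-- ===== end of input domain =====

-- B replaces A's nested per-key rescan of the values by one dedup pass plus a zip with the keys (same return value).

-- module-level constant n = 0
def pvN : Int := 0

-- collections.deque.rotate(k): right rotation by k (modulo length); identity on the empty deque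
def pvRotate {α : Type} (k : Int) (xs : List α) : List α :=
  if xs.length = 0 then xs
  else
    let m := (PySem.Int.mod k xs.length).toNat
    xs.drop (xs.length - m) ++ xs.take (xs.length - m)

-- ===== PORT A =====
-- inner 'for value in dct.values(): …' loop: first value not in sums (none = loop falls through)
def pvInnerA (values : List Int) (sums : List Int) : Option Int :=
  match values with
  | [] => none
  | v :: vs => if v ∈ sums then pvInnerA vs sums else some v

-- outer 'for deger in shift_values:' loop over keys, state = (sums, schucki1)
def pvLoopA (keys : List String) (values : List Int) (sums : List Int)
    (schucki : PySem.Dict String Int) : PySem.Dict String Int :=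
  match keys with
  | [] => schucki
  | k :: ks =>
    match pvInnerA values sums with
    | none => pvLoopA ks values sums schucki
    | some v => pvLoopA ks values (sums ++ [v]) (schucki.insert k v)

def dict_roll (dct : List (String × Int)) : List (String × Int) :=
  (pvLoopA (pvRotate pvN (dct.map Prod.fst)) (dct.map Prod.snd) [] PySem.Dict.empty).items

-- ===== PORT B =====
-- one pass over the values: state = (seen set, distinct list in first-occurrence order)
def pvDistinctB (values : List Int) : PySem.Set Int × List Int :=
  values.foldl
    (fun (p : PySem.Set Int × List Int) v =>
      if PySem.Set.contains p.1 v then p else (PySem.Set.add p.1 v, p.2 ++ [v]))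
    (PySem.Set.empty, [])

def dict_roll_alt (dct : List (String × Int)) : List (String × Int) :=
  (((pvRotate pvN (dct.map Prod.fst)).zip (pvDistinctB (dct.map Prod.snd)).2).foldl
    (fun (d : PySem.Dict String Int) kv => d.insert kv.1 kv.2) PySem.Dict.empty).items

-- ===== PRECONDITION & SPEC =====
def Spec_dict_roll (dct : List (String × Int)) (out : List (String × Int)) : Prop := out = dict_roll_alt dct
instance (dct : List (String × Int)) (out : List (String × Int)) : Decidable (Spec_dict_roll dct out) := by unfold Spec_dict_roll; infer_instance

-- ===== CLAIM (what is proved, stated in full; the proofs are below) =====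
def Claim_equal_dict_roll : Prop := ∀ (dct : List (String × Int)), Dom_dict_roll dct → Spec_dict_roll dct (dict_roll dct)

-- ===== LEMMAS AND PROOFS =====

-- proof-side characterisation: first-occurrence dedup of `values`, excluding what is already in `sums`
def pvDD (sums : List Int) (values : List Int) : List Int :=
  match values with
  | [] => []
  | v :: vs => if v ∈ sums then pvDD sums vs else v :: pvDD (sums ++ [v]) vs

theorem pvDistinctB_eq (values : List Int) : ∀ (s : List Int),
    values.foldl
      (fun (p : PySem.Set Int × List Int) v =>
        if PySem.Set.contains p.1 v then p else (PySem.Set.add p.1 v, p.2 ++ [v]))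
      (s, s) = (s ++ pvDD s values, s ++ pvDD s values) := by
  induction values with
  | nil => intro s; simp [pvDD]
  | cons v vs ih =>
    intro s
    have hstep : (if PySem.Set.contains (s, s).1 v then (s, s)
          else (PySem.Set.add (s, s).1 v, (s, s).2 ++ [v]))
        = if v ∈ s then (s, s) else (s ++ [v], s ++ [v]) := by
      by_cases h : v ∈ s <;> simp [PySem.Set.contains, PySem.Set.add, h]
    rw [List.foldl_cons, hstep]
    by_cases h : v ∈ s
    · rw [if_pos h, ih s]
      simp [pvDD, h]
    · rw [if_neg h, ih (s ++ [v])]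
      simp [pvDD, h]

theorem pvInnerA_head (values : List Int) : ∀ (sums : List Int),
    pvInnerA values sums = (pvDD sums values).head? := by
  induction values with
  | nil => intro sums; simp [pvInnerA, pvDD]
  | cons v vs ih =>
    intro sums
    by_cases h : v ∈ sums
    · simp [pvInnerA, pvDD, h, ih]
    · simp [pvInnerA, pvDD, h]

theorem pvDD_tail (values : List Int) :
    ∀ (s : List Int) (v : Int) (rest : List Int),
      pvDD s values = v :: rest → pvDD (s ++ [v]) values = rest := by
  induction values with
  | nil => intro s v rest h; simp [pvDD] at h
  | cons v' vs ih =>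
    intro s v rest h
    by_cases hc : v' ∈ s
    · rw [pvDD, if_pos hc] at h
      rw [pvDD, if_pos (List.mem_append_left [v] hc)]
      exact ih s v rest h
    · rw [pvDD, if_neg hc] at h
      obtain ⟨rfl, hrest⟩ := List.cons.inj h
      rw [pvDD, if_pos (List.mem_append_right s (by simp))]
      exact hrest

theorem pvLoopA_zip (keys : List String) (values : List Int) :
    ∀ (sums : List Int) (d : PySem.Dict String Int),
      pvLoopA keys values sums d =
        (keys.zip (pvDD sums values)).foldl
          (fun (d : PySem.Dict String Int) kv => d.insert kv.1 kv.2) d := by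
  induction keys with
  | nil => intro sums d; simp [pvLoopA]
  | cons k ks ih =>
    intro sums d
    rcases h : pvDD sums values with _ | ⟨v, rest⟩
    · have hi : pvInnerA values sums = none := by rw [pvInnerA_head, h]; rfl
      simp [pvLoopA, hi, ih, h]
    · have hi : pvInnerA values sums = some v := by rw [pvInnerA_head, h]; rfl
      simp only [pvLoopA, hi, List.zip_cons_cons, List.foldl_cons]
      rw [ih (sums ++ [v]) (d.insert k v), pvDD_tail values sums v rest h]

-- ===== VERDICT (by name: the statement is the Claim_ definition above) =====
theorem dict_roll_spec : Claim_equal_dict_roll := by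
  intro dct _
  unfold Spec_dict_roll dict_roll dict_roll_alt pvDistinctB
  have hb : (List.foldl
      (fun (p : PySem.Set Int × List Int) v =>
        if PySem.Set.contains p.1 v then p else (PySem.Set.add p.1 v, p.2 ++ [v]))
      (PySem.Set.empty, []) (dct.map Prod.snd)).2 = pvDD [] (dct.map Prod.snd) := by
    rw [show (PySem.Set.empty : PySem.Set Int) = ([] : List Int) from rfl,
      pvDistinctB_eq (dct.map Prod.snd) []]
    simp
  rw [pvLoopA_zip, hb]
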